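-- pv_equiv track=rewrite | github.com/lugia-xiao/GITIII_AG | versions/gitiii_ag_goodone/pathway_analyze_utils.py | group_strings_by_numbers
-- ===== SOURCE A (Python) =====
-- def group_strings_by_numbers(strings, numbers):
--     """
--     Group a list of strings based on unique numbers and return as two ordered lists.
--
--     :param strings: List of strings to be grouped.
--     :param numbers: List of numbers indicating the grouping.
--     :return: Two lists, one with unique numbers and the other with corresponding grouped strings.
--     """
--     numbers=numbers.copy()[:len(strings)]
--     unique_numbers = sorted(set(numbers))
--     grouped_strings = [[] for _ in unique_numbers]
--
--     for string, number in zip(strings, numbers):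
--         index = unique_numbers.index(number)
--         grouped_strings[index].append(string)
--
--     return unique_numbers, grouped_strings
-- ===== SOURCE B (Python) =====
-- def group_strings_by_numbers(strings, numbers):
--     """Sort the (number, string) pairs stably by number, then split the sorted
--     sequence into maximal runs of equal numbers in one scan."""
--     numbers = numbers.copy()[:len(strings)]
--     pairs = sorted(zip(numbers, strings), key=lambda p: p[0])
--     unique_numbers = []
--     grouped_strings = []
--     for n, s in pairs:
--         if unique_numbers and unique_numbers[-1] == n:
--             grouped_strings[-1].append(s)
--         else:
--             unique_numbers.append(n)
--             grouped_strings.append([s])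
--     return unique_numbers, grouped_strings
-- ===== Notes on version B (the rewrite author's own statement) =====
-- stated objective: faster
-- what changed: B stably sorts the (number, string) pairs by number and splits the sorted sequence into runs of equal numbers in one scan, instead of A's sorted-set construction followed by scattering each string into pre-allocated slots via a repeated list.index lookup.
import Mathlib
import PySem

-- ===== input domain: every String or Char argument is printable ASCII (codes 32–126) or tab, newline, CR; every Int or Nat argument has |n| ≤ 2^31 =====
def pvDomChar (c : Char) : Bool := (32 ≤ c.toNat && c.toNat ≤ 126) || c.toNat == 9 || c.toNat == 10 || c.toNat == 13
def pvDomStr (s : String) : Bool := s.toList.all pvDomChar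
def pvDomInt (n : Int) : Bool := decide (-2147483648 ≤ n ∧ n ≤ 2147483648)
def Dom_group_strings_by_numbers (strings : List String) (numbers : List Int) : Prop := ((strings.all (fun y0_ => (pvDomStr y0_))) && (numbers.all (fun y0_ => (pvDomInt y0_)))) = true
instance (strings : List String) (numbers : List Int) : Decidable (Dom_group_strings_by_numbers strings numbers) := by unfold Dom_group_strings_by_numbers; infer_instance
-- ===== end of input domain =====

-- B sorts the (number, string) pairs stably by number and splits the sorted sequence into
-- runs of equal numbers in one scan, instead of A's set-then-sort plus per-element
-- list.index scatter into pre-allocated slots. Objective: a different (sort-based) algorithm.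

-- ===== PORT A =====
def group_strings_by_numbers (strings : List String) (numbers : List Int) : List Int × List (List String) :=
  let nums := PySem.List.slice numbers none (some (strings.length : Int))
  let unique_numbers := PySem.List.sorted (PySem.Set.ofList nums) (fun x => x) false
  let grouped_strings := unique_numbers.map (fun _ => ([] : List String))
  let grouped_strings := (strings.zip nums).foldl
    (fun g p =>
      match PySem.List.index? unique_numbers p.2 with
      | some i => g.set i ((g.getD i []) ++ [p.1])
      | none => g)  -- dead branch: p.2 always occurs in unique_numbers
    grouped_strings
  (unique_numbers, grouped_strings)

-- ===== PORT B =====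
-- one loop iteration: `if unique_numbers and unique_numbers[-1] == n: grouped_strings[-1].append(s)
-- else: unique_numbers.append(n); grouped_strings.append([s])` (getLast? = some n ⇔ nonempty ∧ last == n)
def pvStep (acc : List Int × List (List String)) (p : Int × String) : List Int × List (List String) :=
  if acc.1.getLast? = some p.1 then
    (acc.1, acc.2.dropLast ++ [acc.2.getLast?.getD [] ++ [p.2]])
  else
    (acc.1 ++ [p.1], acc.2 ++ [[p.2]])

def group_strings_by_numbers_alt (strings : List String) (numbers : List Int) : List Int × List (List String) :=
  let nums := PySem.List.slice numbers none (some (strings.length : Int))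
  let pairs := PySem.List.sorted (nums.zip strings) (fun p => p.1) false
  pairs.foldl pvStep ([], [])

-- ===== PRECONDITION & SPEC =====
def Spec_group_strings_by_numbers (strings : List String) (numbers : List Int) (out : List Int × List (List String)) : Prop := out = group_strings_by_numbers_alt strings numbers
instance (strings : List String) (numbers : List Int) (out : List Int × List (List String)) : Decidable (Spec_group_strings_by_numbers strings numbers out) := by unfold Spec_group_strings_by_numbers; infer_instance

-- ===== CLAIM (what is proved, stated in full; the proofs are below) =====
def Claim_equal_group_strings_by_numbers : Prop := ∀ (strings : List String) (numbers : List Int), Dom_group_strings_by_numbers strings numbers → Spec_group_strings_by_numbers strings numbers (group_strings_by_numbers strings numbers)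

-- ===== LEMMAS AND PROOFS =====

-- ---- generic facts about insertBy ----
lemma pv_insertBy_append (before : Int × String → Int × String → Bool) (q : Int × String)
    (ys zs : List (Int × String)) (h : ∀ y ∈ ys, before q y = false) :
    PySem.List.insertBy before q (ys ++ zs) = ys ++ PySem.List.insertBy before q zs := by
  induction ys with
  | nil => simp
  | cons y ys ih =>
    simp only [List.cons_append, PySem.List.insertBy, h y List.mem_cons_self]
    simp only [Bool.false_eq_true, if_false, List.cons.injEq, true_and]
    exact ih (fun y hy => h y (List.mem_cons_of_mem _ hy))

lemma pv_insertBy_front (before : Int × String → Int × String → Bool) (q : Int × String)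
    (l : List (Int × String)) (h : ∀ y ∈ l, before q y = true) :
    PySem.List.insertBy before q l = q :: l := by
  cases l with
  | nil => rfl
  | cons y ys => simp [PySem.List.insertBy, h y List.mem_cons_self]

-- ---- ordered insertion of a key into a strictly increasing key list ----
def pvInsertKey (k : Int) : List Int → List Int
  | [] => [k]
  | a :: u => if k < a then k :: a :: u else if k = a then a :: u else a :: pvInsertKey k u

lemma pv_mem_insertKey (k : Int) (u : List Int) (x : Int) :
    x ∈ pvInsertKey k u ↔ x ∈ u ∨ x = k := by
  induction u with
  | nil => simp [pvInsertKey]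
  | cons a u ih =>
    by_cases h1 : k < a
    · simp [pvInsertKey, h1]; tauto
    · by_cases h2 : k = a
      · subst h2; simp [pvInsertKey]; tauto
      · simp [pvInsertKey, h1, h2, ih]; tauto

lemma pv_insertKey_pairwise (k : Int) (u : List Int) (hu : u.Pairwise (· < ·)) :
    (pvInsertKey k u).Pairwise (· < ·) := by
  induction u with
  | nil => simp [pvInsertKey]
  | cons a u ih =>
    rcases List.pairwise_cons.mp hu with ⟨ha, hu'⟩
    by_cases h1 : k < a
    · simp only [pvInsertKey, h1, if_true]
      refine List.pairwise_cons.mpr ⟨?_, hu⟩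
      intro b hb
      rcases List.mem_cons.mp hb with rfl | hb
      · exact h1
      · exact lt_trans h1 (ha b hb)
    · by_cases h2 : k = a
      · subst h2; simpa [pvInsertKey, h1] using hu
      · simp only [pvInsertKey, h1, h2, if_false]
        refine List.pairwise_cons.mpr ⟨?_, ih hu'⟩
        intro b hb
        rcases (pv_mem_insertKey k u b).mp hb with hb | rfl
        · exact ha b hb
        · omega

lemma pv_insertKey_perm (k : Int) (u : List Int) (hu : u.Pairwise (· < ·)) :
    (pvInsertKey k u).Perm (if k ∈ u then u else k :: u) := by
  induction u with
  | nil => simp [pvInsertKey]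
  | cons a u ih =>
    rcases List.pairwise_cons.mp hu with ⟨ha, hu'⟩
    by_cases h1 : k < a
    · have hk : k ∉ a :: u := by
        intro h
        rcases List.mem_cons.mp h with rfl | h
        · omega
        · have := ha _ h; omega
      simp [pvInsertKey, h1, hk]
    · by_cases h2 : k = a
      · subst h2
        simp [pvInsertKey]
      · have hstep : pvInsertKey k (a :: u) = a :: pvInsertKey k u := by
          simp [pvInsertKey, h1, h2]
        rw [hstep]
        by_cases hk : k ∈ u
        · rw [if_pos (List.mem_cons_of_mem a hk)]
          have := (ih hu').trans (by rw [if_pos hk])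
          exact this.cons a
        · have hk' : k ∉ a :: u := by
            intro h; rcases List.mem_cons.mp h with rfl | h
            · exact h2 rfl
            · exact hk h
          rw [if_neg hk']
          have h3 := ((ih hu').trans (by rw [if_neg hk])).cons a
          exact h3.trans (List.Perm.swap k a u)

-- ---- one stable insertion, seen on the blocks decomposition ----
lemma pv_insert_flatMap (q : Int × String) (u : List Int) (B : Int → List (Int × String))
    (hu : u.Pairwise (· < ·))
    (hB : ∀ k, ∀ x ∈ B k, x.1 = k)
    (hq : q.1 ∉ u → B q.1 = []) :
    PySem.List.insertBy (fun a b => decide (a.1 < b.1)) q (u.flatMap B)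
      = (pvInsertKey q.1 u).flatMap (fun k => B k ++ if k = q.1 then [q] else []) := by
  induction u with
  | nil =>
    simp [pvInsertKey, hq (by simp), PySem.List.insertBy]
  | cons a u ih =>
    rcases List.pairwise_cons.mp hu with ⟨ha, hu'⟩
    simp only [List.flatMap_cons]
    by_cases h1 : q.1 < a
    · -- q goes in front of everything
      have hq1 : q.1 ∉ a :: u := by
        intro h
        rcases List.mem_cons.mp h with rfl | h
        · omega
        · have := ha _ h; omega
      have hB0 : B q.1 = [] := hq hq1
      have hall : ∀ y ∈ B a ++ u.flatMap B, (fun a b : Int × String => decide (a.1 < b.1)) q y = true := by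
        intro y hy
        rcases List.mem_append.mp hy with hy | hy
        · have := hB a y hy; simp only [decide_eq_true_eq]; omega
        · rcases List.mem_flatMap.mp hy with ⟨k, hk, hyk⟩
          have hy1 := hB k y hyk
          have hak := ha k hk
          simp only [decide_eq_true_eq]; omega
      rw [pv_insertBy_front _ _ _ hall]
      have hstep : pvInsertKey q.1 (a :: u) = q.1 :: a :: u := by
        simp [pvInsertKey, h1]
      rw [hstep]
      simp only [List.flatMap_cons, hB0, List.nil_append]
      have hna : ¬ (a = q.1) := by omega
      have hrest : (u.flatMap fun k => B k ++ if k = q.1 then [q] else []) = u.flatMap B := by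
        refine List.flatMap_congr ?_
        intro k hk
        have : ¬ (k = q.1) := by have := ha k hk; omega
        simp [this]
      simp [hna, hrest]
    · by_cases h2 : q.1 = a
      · -- q joins block a, at its end
        have hnoBa : ∀ y ∈ B a, (fun a b : Int × String => decide (a.1 < b.1)) q y = false := by
          intro y hy
          have := hB a y hy
          simp only [decide_eq_false_iff_not]; omega
        rw [pv_insertBy_append _ _ _ _ hnoBa]
        have hall : ∀ y ∈ u.flatMap B, (fun a b : Int × String => decide (a.1 < b.1)) q y = true := by
          intro y hy
          rcases List.mem_flatMap.mp hy with ⟨k, hk, hyk⟩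
          have hy1 := hB k y hyk
          have hak := ha k hk
          simp only [decide_eq_true_eq]; omega
        rw [pv_insertBy_front _ _ _ hall]
        have hstep : pvInsertKey q.1 (a :: u) = a :: u := by
          simp [pvInsertKey, h2]
        rw [hstep]
        simp only [List.flatMap_cons, if_pos h2.symm]
        have hrest : (u.flatMap fun k => B k ++ if k = q.1 then [q] else []) = u.flatMap B := by
          refine List.flatMap_congr ?_
          intro k hk
          have : ¬ (k = q.1) := by have := ha k hk; omega
          simp [this]
        simp [hrest]
      · -- q belongs further right
        have h3 : a < q.1 := by omega
        have hnoBa : ∀ y ∈ B a, (fun a b : Int × String => decide (a.1 < b.1)) q y = false := by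
          intro y hy
          have := hB a y hy
          simp only [decide_eq_false_iff_not]; omega
        rw [pv_insertBy_append _ _ _ _ hnoBa]
        have hq' : q.1 ∉ u → B q.1 = [] := by
          intro h
          exact hq (by simp [List.mem_cons, h2, h])
        rw [ih hu' hq']
        have hstep : pvInsertKey q.1 (a :: u) = a :: pvInsertKey q.1 u := by
          simp [pvInsertKey, h2, not_lt.mpr (le_of_lt h3)]
        rw [hstep]
        simp only [List.flatMap_cons]
        have hna : ¬ (a = q.1) := by omega
        simp [hna]

-- ---- the stable sort characterised as sorted-unique-keys flatMap key-blocks ----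
lemma pv_sorted_append_singleton (qs : List (Int × String)) (q : Int × String) :
    PySem.List.sorted (qs ++ [q]) (fun p => p.1) false
      = PySem.List.insertBy (fun a b => decide (a.1 < b.1)) q
          (PySem.List.sorted qs (fun p => p.1) false) := by
  rw [PySem.List.sorted_eq_foldl_insertBy, PySem.List.sorted_eq_foldl_insertBy, List.foldl_append]
  rfl

lemma pv_set_append_singleton (ns : List Int) (n : Int) :
    PySem.List.sorted (PySem.Set.ofList (ns ++ [n])) (fun x => x) false
      = pvInsertKey n (PySem.List.sorted (PySem.Set.ofList ns) (fun x => x) false) := by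
  set u := PySem.List.sorted (PySem.Set.ofList ns) (fun x => x) false with hu
  have hpw : u.Pairwise (· < ·) := PySem.List.sorted_ofList_pairwise_lt ns
  have hperm_u : u.Perm (PySem.Set.ofList ns) := PySem.List.sorted_perm _ _ _
  have hofl : PySem.Set.ofList (ns ++ [n]) = PySem.Set.add (PySem.Set.ofList ns) n := by
    simp [PySem.Set.ofList]
  have hmem_u : n ∈ u ↔ n ∈ PySem.Set.ofList ns := hperm_u.mem_iff
  have hcont : ((PySem.Set.ofList ns : List Int).contains n = true) ↔ n ∈ PySem.Set.ofList ns :=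
    List.contains_iff_mem
  have hperm : (pvInsertKey n u).Perm (PySem.Set.ofList (ns ++ [n])) := by
    rw [hofl]
    refine (pv_insertKey_perm n u hpw).trans ?_
    by_cases hn : n ∈ PySem.Set.ofList ns
    · rw [if_pos (hmem_u.mpr hn)]
      have hadd : (PySem.Set.ofList ns).add n = PySem.Set.ofList ns := by
        simp only [PySem.Set.add, hcont.mpr hn, if_true]
      rw [hadd]; exact hperm_u
    · rw [if_neg (fun h => hn (hmem_u.mp h))]
      have hadd : (PySem.Set.ofList ns).add n = PySem.Set.ofList ns ++ [n] := by
        simp only [PySem.Set.add, if_neg (fun h => hn (hcont.mp h))]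
      rw [hadd]
      exact (hperm_u.cons n).trans (List.perm_append_singleton n _).symm
  exact PySem.List.sorted_id_eq_of_perm_of_pairwise _ _ hperm
    ((pv_insertKey_pairwise n u hpw).imp le_of_lt)

lemma pv_sorted_flatMap (qs : List (Int × String)) :
    PySem.List.sorted qs (fun p => p.1) false
      = (PySem.List.sorted (PySem.Set.ofList (qs.map (·.1))) (fun x => x) false).flatMap
          (fun k => qs.filter (fun p => p.1 == k)) := by
  induction qs using List.reverseRecOn with
  | nil => rfl
  | append_singleton qs q ih =>
    rw [pv_sorted_append_singleton, ih]
    set u := PySem.List.sorted (PySem.Set.ofList (qs.map (·.1))) (fun x => x) false with hu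
    have hpw : u.Pairwise (· < ·) := PySem.List.sorted_ofList_pairwise_lt _
    have hB : ∀ k, ∀ x ∈ qs.filter (fun p => p.1 == k), x.1 = k := by
      intro k x hx
      have := (List.mem_filter.mp hx).2
      simpa using this
    have hq : q.1 ∉ u → qs.filter (fun p => p.1 == q.1) = [] := by
      intro h
      rw [List.filter_eq_nil_iff]
      intro p hp
      simp only [beq_iff_eq]
      intro e
      apply h
      rw [hu, PySem.List.mem_sorted, PySem.Set.mem_ofList]
      exact e ▸ List.mem_map_of_mem hp
    rw [pv_insert_flatMap q u _ hpw hB hq]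
    rw [List.map_append, List.map_cons, List.map_nil, pv_set_append_singleton]
    refine List.flatMap_congr ?_
    intro k hk
    rw [List.filter_append]
    simp only [List.filter_cons, List.filter_nil]
    by_cases e : k = q.1
    · simp [e]
    · have e' : ¬ (q.1 == k) = true := by simpa using fun h => e h.symm
      simp [e, e']

-- ---- B's run-splitting loop on the blocks decomposition ----
lemma pv_blockfold (a : Int) (xs : List (Int × String)) (hxs : ∀ x ∈ xs, x.1 = a)
    (us : List Int) (hlast : us.getLast? = some a) (gs : List (List String)) (h : List String) :
    xs.foldl pvStep (us, gs ++ [h]) = (us, gs ++ [h ++ xs.map (·.2)]) := by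
  induction xs generalizing h with
  | nil => simp
  | cons x xs ih =>
    have hx : x.1 = a := hxs x List.mem_cons_self
    simp only [List.foldl_cons]
    have hcond : us.getLast? = some x.1 := by rw [hx]; exact hlast
    simp only [pvStep, hcond, if_true]
    rw [List.dropLast_concat, List.getLast?_concat]
    simp only [Option.getD_some]
    rw [ih (fun y hy => hxs y (List.mem_cons_of_mem _ hy)) (h ++ [x.2])]
    simp

lemma pv_runsplit (u : List Int) (B : Int → List (Int × String))
    (hu : u.Pairwise (· < ·))
    (hB : ∀ k, ∀ x ∈ B k, x.1 = k)
    (hne : ∀ k ∈ u, B k ≠ [])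
    (us : List Int) (gs : List (List String))
    (hlast : ∀ k ∈ u, ∀ m, us.getLast? = some m → m < k) :
    (u.flatMap B).foldl pvStep (us, gs)
      = (us ++ u, gs ++ u.map (fun k => (B k).map (·.2))) := by
  induction u generalizing us gs with
  | nil => simp
  | cons a u ih =>
    rcases List.pairwise_cons.mp hu with ⟨ha, hu'⟩
    obtain ⟨x, xs, hBa⟩ := List.exists_cons_of_ne_nil (hne a List.mem_cons_self)
    have hx : x.1 = a := hB a x (hBa ▸ List.mem_cons_self)
    simp only [List.flatMap_cons, List.foldl_append, hBa, List.foldl_cons]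
    -- first element of the block opens a new group
    have hcond : ¬ (us.getLast? = some x.1) := by
      intro h
      have := hlast a List.mem_cons_self x.1 (hx ▸ h)
      omega
    rw [show pvStep (us, gs) x = (us ++ [x.1], gs ++ [[x.2]]) from by
      simp only [pvStep, if_neg hcond]]
    -- the rest of the block appends to it
    have hxs : ∀ y ∈ xs, y.1 = a := by
      intro y hy
      exact hB a y (hBa ▸ List.mem_cons_of_mem _ hy)
    rw [hx]
    rw [pv_blockfold a xs hxs (us ++ [a]) List.getLast?_concat gs [x.2]]
    -- then the remaining blocks
    rw [show [x.2] ++ xs.map (·.2) = x.2 :: xs.map (·.2) from rfl]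
    rw [ih hu' (fun k hk => hne k (List.mem_cons_of_mem _ hk))
      (us ++ [a]) (gs ++ [x.2 :: xs.map (·.2)])
      (by
        intro k hk m hm
        rw [List.getLast?_concat] at hm
        cases hm
        exact ha k hk)]
    simp [hBa]

-- ---- A's scatter loop (set/index into pre-allocated slots) ----
lemma pv_step_map (u : List Int) (hu : u.Nodup) (h : Int → List String) (s : String) (v : Int)
    (hv : v ∈ u) :
    (match PySem.List.index? u v with
     | some i => (u.map h).set i (((u.map h).getD i []) ++ [s])
     | none => u.map h)
    = u.map (fun n => if n = v then h n ++ [s] else h n) := by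
  obtain ⟨k, hk⟩ := Option.isSome_iff_exists.mp ((PySem.List.index?_isSome_iff u v).mpr hv)
  rw [hk]
  obtain ⟨hklt, hkv, _⟩ := PySem.List.getElem_of_index?_eq_some hk
  apply List.ext_getElem (by simp)
  intro j hj1 hj2
  have hjlt : j < u.length := by simpa using hj2
  by_cases hjk : j = k
  · subst hjk
    rw [List.getElem_set_self (by simpa using hjlt)]
    rw [List.getD_eq_getElem _ _ (by simpa using hjlt)]
    simp [hkv]
  · rw [List.getElem_set_ne (fun e => hjk e.symm)]
    have hne : u[j] ≠ v := by
      intro e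
      exact hjk ((List.Nodup.getElem_inj_iff hu).mp (by rw [e, hkv]) )
    simp [hne]

lemma pv_scatter_map (u : List Int) (hu : u.Nodup) (ps : List (String × Int)) (h : Int → List String)
    (hmem : ∀ p ∈ ps, p.2 ∈ u) :
    ps.foldl
      (fun g p =>
        match PySem.List.index? u p.2 with
        | some i => g.set i ((g.getD i []) ++ [p.1])
        | none => g)
      (u.map h)
    = u.map (fun n => h n ++ (ps.filter (fun p => p.2 == n)).map (·.1)) := by
  induction ps generalizing h with
  | nil => simp
  | cons p ps ih =>
    simp only [List.foldl_cons]
    rw [pv_step_map u hu h p.1 p.2 (hmem p (List.mem_cons_self))]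
    rw [ih _ (fun q hq => hmem q (List.mem_cons_of_mem _ hq))]
    apply congrArg (u.map ·)
    funext n
    by_cases hnp : p.2 = n
    · subst hnp
      simp
    · have hnp' : ¬ (n = p.2) := fun e => hnp e.symm
      simp [hnp, hnp']

-- ===== VERDICT (by name: the statement is the Claim_ definition above) =====
theorem group_strings_by_numbers_spec : Claim_equal_group_strings_by_numbers := by
  intro strings numbers _
  unfold Spec_group_strings_by_numbers group_strings_by_numbers group_strings_by_numbers_alt
  simp only [PySem.List.slice_to_natCast]
  set t := numbers.take strings.length with ht
  have hlen : t.length ≤ strings.length := by simp [ht]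
  -- shared facts
  set u := PySem.List.sorted (PySem.Set.ofList t) (fun x => x) false with hu
  have hnodup : u.Nodup :=
    ((PySem.List.sorted_perm (PySem.Set.ofList t) (fun x => x) false).symm).nodup
      (PySem.Set.nodup_ofList t)
  have hpw : u.Pairwise (· < ·) := PySem.List.sorted_ofList_pairwise_lt t
  have hmem_u : ∀ n, n ∈ u ↔ n ∈ t := by
    intro n
    rw [hu, PySem.List.mem_sorted, PySem.Set.mem_ofList]
  -- the B side
  set qs := t.zip strings with hqs
  have hq1 : qs.map (·.1) = t := by
    rw [hqs]
    have := List.map_fst_zip (l₁ := t) (l₂ := strings) hlen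
    simpa using this
  have hsortedq := pv_sorted_flatMap qs
  rw [hq1] at hsortedq
  rw [hsortedq, ← hu]
  rw [pv_runsplit u (fun k => qs.filter (fun p => p.1 == k)) hpw
    (by intro k x hx; simpa using (List.mem_filter.mp hx).2)
    (by
      intro k hk
      have hkt : k ∈ t := (hmem_u k).mp hk
      have : k ∈ qs.map (·.1) := hq1 ▸ hkt
      rcases List.mem_map.mp this with ⟨p, hp, he⟩
      intro hnil
      have hnil' : qs.filter (fun p => p.1 == k) = [] := hnil
      have : p ∈ qs.filter (fun p => p.1 == k) := List.mem_filter.mpr ⟨hp, by simp [he]⟩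
      rw [hnil'] at this
      exact (List.not_mem_nil) this)
    [] [] (by intro k hk m hm; simp at hm)]
  simp only [List.nil_append]
  -- the A side
  set ps := strings.zip t with hps
  have hmem : ∀ p ∈ ps, p.2 ∈ u := by
    intro p hp
    exact (hmem_u p.2).mpr (List.of_mem_zip hp).2
  apply congrArg (Prod.mk u)
  rw [pv_scatter_map u hnodup ps (fun _ => []) hmem]
  apply List.map_congr_left
  intro n _
  simp only [List.nil_append]
  -- filtered zip on both sides selects the same (string, position) pairs
  have hswap : ps.map Prod.swap = qs := by
    rw [hps, hqs, List.zip_swap]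
  rw [← hswap, List.filter_map, List.map_map]
  congr 1
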